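-- pv_equiv track=rewrite | github.com/AnjoliPodder/Anjoli-Project | podder_listexer.py | transcribe2
-- ===== SOURCE A (Python) =====
-- def transcribe2(tt):
--     uu = ""
--     for ch in tt:
--         if ch == "T":
--             uu += "U"
--         else:
--             uu += ch
--     return uu
-- ===== SOURCE B (Python) =====
-- def transcribe2(tt):
--     return tt.replace("T", "U")
-- ===== Notes on version B (the rewrite author's own statement) =====
-- stated objective: idiomatic
-- what changed: Replaces the character-by-character loop with a growing accumulator string by a single built-in str.replace call that scans for substring occurrences and splices in the replacement.
import Mathlib
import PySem

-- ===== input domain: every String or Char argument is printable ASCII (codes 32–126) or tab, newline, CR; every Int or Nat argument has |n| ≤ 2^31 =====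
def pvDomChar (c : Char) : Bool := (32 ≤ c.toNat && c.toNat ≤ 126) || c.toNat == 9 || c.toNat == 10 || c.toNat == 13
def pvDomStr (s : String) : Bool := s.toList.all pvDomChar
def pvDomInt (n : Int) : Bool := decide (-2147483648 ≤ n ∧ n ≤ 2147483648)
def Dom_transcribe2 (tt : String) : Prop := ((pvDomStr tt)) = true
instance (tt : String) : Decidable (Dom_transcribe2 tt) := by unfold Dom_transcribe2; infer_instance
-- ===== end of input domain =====

-- B changes: the per-character loop with a growing accumulator becomes one idiomatic str.replace("T","U") call.

-- ===== PORT A =====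
-- uu = ""; for ch in tt: uu += "U" if ch == "T" else ch; return uu
def transcribe2 (tt : String) : String :=
  String.ofList (tt.toList.foldl (fun uu ch => uu ++ (if ch == 'T' then ['U'] else [ch])) [])

-- ===== PORT B =====
-- return tt.replace("T", "U")
def transcribe2_alt (tt : String) : String :=
  PySem.Str.replace tt "T" "U"

-- ===== PRECONDITION & SPEC =====
def Spec_transcribe2 (tt : String) (out : String) : Prop := out = transcribe2_alt tt
instance (tt : String) (out : String) : Decidable (Spec_transcribe2 tt out) := by unfold Spec_transcribe2; infer_instance

-- ===== CLAIM =====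
def Claim_equal_transcribe2 : Prop := ∀ (tt : String), Dom_transcribe2 tt → Spec_transcribe2 tt (transcribe2 tt)

-- ===== LEMMAS AND PROOFS =====

theorem transcribe2_foldl_eq_map (cs : List Char) (acc : List Char) :
    cs.foldl (fun uu ch => uu ++ (if ch == 'T' then ['U'] else [ch])) acc
      = acc ++ cs.map (fun c => if c == 'T' then 'U' else c) := by
  induction cs generalizing acc with
  | nil => simp
  | cons c t ih =>
    rw [List.foldl_cons, ih]
    by_cases hc : c = 'T' <;> simp [hc]

theorem transcribe2_replace_go_eq (cs : List Char) (fuel : Nat) (acc : List Char)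
    (h : cs.length ≤ fuel) :
    PySem.Chars.replace.go ['T'] ['U'] fuel cs acc
      = acc.reverse ++ cs.map (fun c => if c == 'T' then 'U' else c) := by
  induction cs generalizing fuel acc with
  | nil =>
    cases fuel <;> simp [PySem.Chars.replace.go]
  | cons c t ih =>
    cases fuel with
    | zero => simp at h
    | succ f =>
      by_cases hc : c = 'T'
      · subst hc
        simp [PySem.Chars.replace.go, List.isPrefixOf, ih f _ (by simpa using h)]
      · have hpre : List.isPrefixOf ['T'] (c :: t) = false := by
          simp [List.isPrefixOf]
          exact fun he => hc he.symm
        simp [PySem.Chars.replace.go, hpre, ih f _ (by simpa using h), hc]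

-- ===== VERDICT =====
theorem transcribe2_spec : Claim_equal_transcribe2 := by
  intro tt _
  unfold Spec_transcribe2 transcribe2 transcribe2_alt
  rw [transcribe2_foldl_eq_map]
  have hT : "T".toList = ['T'] := rfl
  have hU : "U".toList = ['U'] := rfl
  simp only [PySem.Str.replace, PySem.Chars.replace, hT, hU, List.isEmpty]
  rw [transcribe2_replace_go_eq tt.toList tt.toList.length [] (le_refl _)]
  rfl
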